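-- pv_equiv track=rewrite | github.com/alussana/SVM-II-Str-classifier | local/src/sov_performance.py | compute_sov_segments
-- ===== SOURCE A (Python) =====
-- def compute_sov_segments(real, imputed, ss):
-- 	real_segments = []
-- 	imputed_segments = []
-- 	pos = 0; real_start = -1; imputed_start = -1; real_end = -1; imputed_end = -1
-- 	while pos < len(real):
-- 		if real[pos] == ss:
-- 			real_end = pos
-- 			if real_start == -1:
-- 				real_start = pos
-- 		else:
-- 			if real_end != -1:
-- 				real_segments.append((real_start, real_end))
-- 				real_start = -1
-- 				real_end = -1
-- 		if imputed[pos] == ss: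
-- 			imputed_end = pos
-- 			if imputed_start == -1:
-- 				imputed_start = pos
-- 		else:
-- 			if imputed_end != -1:
-- 				imputed_segments.append((imputed_start, imputed_end))
-- 				imputed_start = -1
-- 				imputed_end = -1
-- 		pos = pos + 1
-- 	if real_end != -1:
-- 		real_segments.append((real_start, real_end))
-- 	if imputed_end != -1:
-- 		imputed_segments.append((imputed_start, imputed_end))
-- 	return(real_segments, imputed_segments)
-- ===== SOURCE B (Python) =====
-- def compute_sov_segments(real, imputed, ss):
--     def extract(seq, n):
--         segments = []
--         pos = 0
--         while pos < n:
--             ch = seq[pos]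
--             end = pos + 1
--             while end < n and seq[end] == ch:
--                 end += 1
--             if ch == ss:
--                 segments.append((pos, end - 1))
--             pos = end
--         return segments
--     n = len(real)
--     return (extract(real, n), extract(imputed, n))
-- ===== Notes on version B (the rewrite author's own statement) =====
-- stated objective: simpler
-- what changed: Replaces the single interleaved loop with sentinel start/end state and a manual end-of-string flush by a helper that scans each sequence separately, consuming one whole run of equal characters at a time and emitting (start, end) directly per matching run.
import Mathlib
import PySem

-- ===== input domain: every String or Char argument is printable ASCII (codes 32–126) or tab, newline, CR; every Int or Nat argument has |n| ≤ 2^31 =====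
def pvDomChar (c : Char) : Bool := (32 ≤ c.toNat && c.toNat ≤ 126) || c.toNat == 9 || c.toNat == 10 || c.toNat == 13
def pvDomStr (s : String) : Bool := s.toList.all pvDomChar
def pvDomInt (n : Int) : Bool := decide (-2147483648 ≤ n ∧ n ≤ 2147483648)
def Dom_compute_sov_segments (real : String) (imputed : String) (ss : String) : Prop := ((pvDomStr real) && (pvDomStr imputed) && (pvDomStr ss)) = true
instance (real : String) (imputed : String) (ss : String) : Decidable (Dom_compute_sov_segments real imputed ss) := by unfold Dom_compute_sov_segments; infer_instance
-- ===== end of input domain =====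

-- B replaces A's interleaved sentinel start/end tracking by two independent run-at-a-time scans (objective: simpler).

-- ===== PORT A =====
-- A's while-loop: pos walks 0..len(real)-1, reading real[pos] and imputed[pos]; the
-- imputed character is read with headD — the default is never reached under Pre_
-- (Python raises IndexError exactly there, which Pre_ excludes).
def aLoop (ss : List Char) : List Char → List Char → Int →
    List (Int × Int) → List (Int × Int) → Int → Int → Int → Int →
    (List (Int × Int)) × (List (Int × Int)) × Int × Int × Int × Int
  | [], _, _, rsegs, isegs, rstart, istart, rend, iend =>
      (rsegs, isegs, rstart, istart, rend, iend)
  | rc :: rrest, il, pos, rsegs, isegs, rstart, istart, rend, iend =>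
      let ic := il.headD ' '
      let r3 : List (Int × Int) × Int × Int :=
        if [rc] = ss then (rsegs, (if rstart = -1 then pos else rstart), pos)
        else if rend ≠ -1 then (rsegs ++ [(rstart, rend)], -1, -1)
        else (rsegs, rstart, rend)
      let i3 : List (Int × Int) × Int × Int :=
        if [ic] = ss then (isegs, (if istart = -1 then pos else istart), pos)
        else if iend ≠ -1 then (isegs ++ [(istart, iend)], -1, -1)
        else (isegs, istart, iend)
      aLoop ss rrest il.tail (pos + 1) r3.1 i3.1 r3.2.1 i3.2.1 r3.2.2 i3.2.2

def compute_sov_segments (real : String) (imputed : String) (ss : String) : (List (Int × Int)) × (List (Int × Int)) :=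
  let st := aLoop ss.toList real.toList imputed.toList 0 [] [] (-1) (-1) (-1) (-1)
  let rsegs := if st.2.2.2.2.1 ≠ -1 then st.1 ++ [(st.2.2.1, st.2.2.2.2.1)] else st.1
  let isegs := if st.2.2.2.2.2 ≠ -1 then st.2.1 ++ [(st.2.2.2.1, st.2.2.2.2.2)] else st.2.1
  (rsegs, isegs)

-- ===== PORT B =====
-- B's extract(seq, n): consume one run of equal characters at a time (the inner
-- while-scan is takeWhile/dropWhile), emitting (start, inclusive end) for matching runs.
def bExtract (ss : List Char) : List Char → Int → List (Int × Int)
  | [], _ => []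
  | c :: rest, pos =>
      let run := rest.takeWhile (· == c)
      let len : Int := 1 + run.length
      let rest' := rest.dropWhile (· == c)
      let tail := bExtract ss rest' (pos + len)
      if [c] = ss then (pos, pos + len - 1) :: tail else tail
  termination_by cs => cs.length
  decreasing_by
    have := List.length_dropWhile_le (· == c) rest
    simp; omega

def compute_sov_segments_alt (real : String) (imputed : String) (ss : String) : (List (Int × Int)) × (List (Int × Int)) :=
  let n := real.toList.length
  (bExtract ss.toList real.toList 0, bExtract ss.toList (imputed.toList.take n) 0)

-- ===== PRECONDITION & SPEC =====
-- Pre_ excludes exactly the inputs where Python A raises IndexError (imputed shorter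
-- than real); B raises there too.
def Pre_compute_sov_segments (real : String) (imputed : String) (ss : String) : Prop :=
  real.toList.length ≤ imputed.toList.length
instance (real : String) (imputed : String) (ss : String) : Decidable (Pre_compute_sov_segments real imputed ss) := by unfold Pre_compute_sov_segments; infer_instance

def pvWitness_compute_sov_segments : String × String × String := ("aab", "aba", "a")

def Spec_compute_sov_segments (real : String) (imputed : String) (ss : String) (out : (List (Int × Int)) × (List (Int × Int))) : Prop := out = compute_sov_segments_alt real imputed ss
instance (real : String) (imputed : String) (ss : String) (out : (List (Int × Int)) × (List (Int × Int))) : Decidable (Spec_compute_sov_segments real imputed ss out) := by unfold Spec_compute_sov_segments; infer_instance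

-- ===== CLAIM (what is proved, stated in full; the proofs are below) =====
def Claim_equal_compute_sov_segments : Prop := ∀ (real : String) (imputed : String) (ss : String), Dom_compute_sov_segments real imputed ss → Pre_compute_sov_segments real imputed ss → Spec_compute_sov_segments real imputed ss (compute_sov_segments real imputed ss)

-- ===== LEMMAS AND PROOFS =====

-- proof-side single-sequence version of A's loop (one component of aLoop's state)
def loop1 (ss : List Char) : List Char → Int → List (Int × Int) → Int → Int →
    List (Int × Int) × Int × Int
  | [], _, acc, s, e => (acc, s, e)
  | c :: rest, pos, acc, s, e =>
      let t : List (Int × Int) × Int × Int :=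
        if [c] = ss then (acc, (if s = -1 then pos else s), pos)
        else if e ≠ -1 then (acc ++ [(s, e)], -1, -1)
        else (acc, s, e)
      loop1 ss rest (pos + 1) t.1 t.2.1 t.2.2

-- A's end-of-loop flush
def flush1 (st : List (Int × Int) × Int × Int) : List (Int × Int) :=
  if st.2.2 ≠ -1 then st.1 ++ [(st.2.1, st.2.2)] else st.1

-- the interleaved loop is the product of two single-sequence loops
theorem aLoop_split (ss : List Char) (rl : List Char) : ∀ (il : List Char) (pos : Int)
    (rsegs isegs : List (Int × Int)) (rs is_ re ie : Int), rl.length ≤ il.length →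
    aLoop ss rl il pos rsegs isegs rs is_ re ie =
      ((loop1 ss rl pos rsegs rs re).1, (loop1 ss (il.take rl.length) pos isegs is_ ie).1,
       (loop1 ss rl pos rsegs rs re).2.1, (loop1 ss (il.take rl.length) pos isegs is_ ie).2.1,
       (loop1 ss rl pos rsegs rs re).2.2, (loop1 ss (il.take rl.length) pos isegs is_ ie).2.2) := by
  induction rl with
  | nil => intro il pos rsegs isegs rs is_ re ie h; simp [aLoop, loop1]
  | cons rc rrest ih =>
    intro il pos rsegs isegs rs is_ re ie h
    cases il with
    | nil => simp at h
    | cons i irest =>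
      simp only [List.length_cons, Nat.add_le_add_iff_right] at h
      simp only [aLoop, loop1, List.headD_cons, List.tail_cons, List.length_cons,
        List.take_succ_cons]
      rw [ih irest (pos + 1) _ _ _ _ _ _ h]
      rfl

-- skipping a non-matching head is skipping its whole run
theorem bExtract_skip (ss : List Char) (c : Char) (rest : List Char) (pos : Int)
    (hc : ¬ ([c] = ss)) : bExtract ss (c :: rest) pos = bExtract ss rest (pos + 1) := by
  cases rest with
  | nil => simp [bExtract, hc]
  | cons d rest2 =>
    by_cases hd : d = c
    · subst hd
      rw [bExtract, bExtract]
      simp [hc]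
      ring_nf
    · rw [bExtract, bExtract]
      have hbd : (d == c) = false := by simp [hd]
      simp [hc, hbd]
      rw [bExtract]

-- main invariant: flushing A's single-sequence loop yields B's run extraction
theorem loop1_extract (ss : List Char) (cs : List Char) : ∀ (pos : Int)
    (acc : List (Int × Int)) (s e : Int), 0 ≤ pos → (e = -1 ↔ s = -1) →
    flush1 (loop1 ss cs pos acc s e) =
      (if e = -1 then acc ++ bExtract ss cs pos
       else
        acc ++ (s, if (cs.takeWhile (fun d => decide ([d] = ss))).length = 0 then e
                   else pos + (cs.takeWhile (fun d => decide ([d] = ss))).length - 1) ::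
          bExtract ss (cs.dropWhile (fun d => decide ([d] = ss)))
            (pos + (cs.takeWhile (fun d => decide ([d] = ss))).length)) := by
  induction cs with
  | nil =>
    intro pos acc s e hpos hiff
    by_cases he : e = -1
    · simp [loop1, flush1, bExtract, he, hiff.mp he]
    · simp [loop1, flush1, bExtract, he]
  | cons c rest ih =>
    intro pos acc s e hpos hiff
    by_cases hc : [c] = ss
    · -- matching head: enter/extend a run
      have hP : (fun d => decide ([d] = ss)) = (fun d => d == c) := by
        funext d; rw [← hc]
        by_cases h2 : d = c <;> simp [h2]
      rw [loop1]
      simp only [hc, if_pos]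
      have hs' : ¬ ((if s = -1 then pos else s) = -1) := by
        split <;> omega
      rw [ih (pos + 1) acc _ pos (by omega)
        (by constructor <;> intro h <;> [omega; exact absurd h hs'])]
      rw [if_neg (by omega : ¬ (pos : Int) = -1)]
      by_cases he : e = -1
      · have hs : s = -1 := hiff.mp he
        rw [if_pos he, hs, if_pos rfl, bExtract]
        simp only [hc, if_pos, hP]
        have hk : (if (List.takeWhile (fun d => d == c) rest).length = 0 then pos
            else pos + 1 + ((List.takeWhile (fun d => d == c) rest).length : Int) - 1)
            = pos + (1 + ((List.takeWhile (fun d => d == c) rest).length : Int)) - 1 := by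
          split <;> omega
        rw [hk]
        ring_nf
      · have hs : ¬ s = -1 := fun h => he (hiff.mpr h)
        rw [if_neg he, if_neg hs, List.takeWhile_cons, List.dropWhile_cons]
        simp only [hc, decide_true, if_pos, List.length_cons, hP]
        have hk : (if (List.takeWhile (fun d => d == c) rest).length = 0 then pos
            else pos + 1 + ((List.takeWhile (fun d => d == c) rest).length : Int) - 1)
            = pos + (((List.takeWhile (fun d => d == c) rest).length : Int) + 1) - 1 := by
          split <;> omega
        rw [hk]
        have hk2 : ¬ ((List.takeWhile (fun d => d == c) rest).length + 1 = 0) := by omega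
        rw [if_neg hk2]
        push_cast
        ring_nf
    · -- non-matching head
      have hPc : (decide ([c] = ss)) = false := by simp [hc]
      rw [loop1]
      simp only [hc, if_false]
      by_cases he : e = -1
      · have hs : s = -1 := hiff.mp he
        rw [if_neg (by simp [he] : ¬ (e ≠ -1))]
        rw [ih (pos + 1) acc s e (by omega) hiff]
        rw [if_pos he, if_pos he, bExtract_skip ss c rest pos hc]
      · rw [if_pos he]
        rw [ih (pos + 1) (acc ++ [(s, e)]) (-1) (-1) (by omega) (by simp)]
        rw [if_pos rfl, if_neg he]
        rw [List.takeWhile_cons, List.dropWhile_cons]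
        simp only [hPc, if_false, Bool.false_eq_true]
        simp [bExtract_skip ss c rest pos hc]

-- starting from the initial sentinel state, flushing gives exactly B's extraction
theorem loop1_start (ss cs : List Char) :
    (if (loop1 ss cs 0 [] (-1) (-1)).2.2 ≠ -1 then
       (loop1 ss cs 0 [] (-1) (-1)).1 ++
         [((loop1 ss cs 0 [] (-1) (-1)).2.1, (loop1 ss cs 0 [] (-1) (-1)).2.2)]
     else (loop1 ss cs 0 [] (-1) (-1)).1) = bExtract ss cs 0 := by
  have h := loop1_extract ss cs 0 [] (-1) (-1) (by omega) (by simp)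
  rw [if_pos rfl] at h
  simpa [flush1] using h

-- ===== VERDICT (by name: the statement is the Claim_ definition above) =====
theorem compute_sov_segments_spec : Claim_equal_compute_sov_segments := by
  intro real imputed ss _ hpre
  unfold Spec_compute_sov_segments compute_sov_segments compute_sov_segments_alt
  rw [aLoop_split ss.toList real.toList imputed.toList 0 [] [] (-1) (-1) (-1) (-1) hpre]
  dsimp only
  rw [loop1_start, loop1_start]
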